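-- pv_equiv track=rewrite | github.com/Toshiiiii1/DeepMLPractice | LinearAlgebra/Implement Compressed Column Sparse Matrix Format (CSC)/solution.py | compressed_col_sparse_matrix
-- ===== SOURCE A (Python) =====
-- def compressed_col_sparse_matrix(dense_matrix):
--     cols = len(dense_matrix[0])
--     rows = len(dense_matrix)
--
--     vals, row_idx, col_ptr = [], [], [0]
--
--     for i in range(cols):
--         count = 0
--         for j in range(rows):
--             if dense_matrix[j][i] != 0:
--                 vals.append(dense_matrix[j][i])
--                 row_idx.append(j)
--                 count += 1
--         col_ptr.append(col_ptr[-1] + count)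
--
--     return vals, row_idx, col_ptr
--
-- dense_matrix = [
--     [0, 0, 3, 0],
--     [1, 0, 0, 4],
--     [0, 2, 0, 0]
-- ]
-- ===== SOURCE B (Python) =====
-- def compressed_col_sparse_matrix(dense_matrix):
--     cols = len(dense_matrix[0])
--     buckets = [[] for _ in range(cols)]
--     for j, row in enumerate(dense_matrix):
--         for i in range(cols):
--             v = row[i]
--             if v != 0:
--                 buckets[i].append((j, v))
--     vals = [v for b in buckets for (j, v) in b]
--     row_idx = [j for b in buckets for (j, v) in b]
--     col_ptr = [0]
--     for b in buckets:
--         col_ptr.append(col_ptr[-1] + len(b))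
--     return vals, row_idx, col_ptr
-- ===== Notes on version B (the rewrite author's own statement) =====
-- stated objective: alternative
-- what changed: Single row-major pass filling one bucket list per column (matching the matrix's memory layout), then vals/row_idx/col_ptr are assembled from the buckets, instead of A's column-major nested scan that re-walks all rows once per column while counting incrementally.
import Mathlib
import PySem

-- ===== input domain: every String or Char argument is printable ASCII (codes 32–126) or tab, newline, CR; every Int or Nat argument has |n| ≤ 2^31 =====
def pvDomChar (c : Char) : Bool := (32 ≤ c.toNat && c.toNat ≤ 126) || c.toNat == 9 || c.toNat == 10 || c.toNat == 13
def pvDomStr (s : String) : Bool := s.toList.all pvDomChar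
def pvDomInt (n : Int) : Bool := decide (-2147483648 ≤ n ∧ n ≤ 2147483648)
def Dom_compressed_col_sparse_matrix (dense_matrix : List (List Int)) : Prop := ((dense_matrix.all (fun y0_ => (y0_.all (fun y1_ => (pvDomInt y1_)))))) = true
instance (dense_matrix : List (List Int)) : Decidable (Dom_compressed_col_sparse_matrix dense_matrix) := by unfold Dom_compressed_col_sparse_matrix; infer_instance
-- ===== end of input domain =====

-- B replaces A's column-major nested scan (one pass over all rows per column, counting
-- incrementally) by a single row-major pass filling one bucket per column, from which
-- vals/row_idx/col_ptr are then assembled; objective: alternative (same asymptotic cost).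

-- ===== PORT A =====
def compressed_col_sparse_matrix (dense_matrix : List (List Int)) : List Int × List Int × List Int :=
  let cols : Int := ((PySem.List.pyGetD dense_matrix 0 []).length : Int)
  let rows : Int := (dense_matrix.length : Int)
  (PySem.List.pyRange 0 cols 1).foldl
    (fun (st : List Int × List Int × List Int) (i : Int) =>
      let inner := (PySem.List.pyRange 0 rows 1).foldl
        (fun (s : List Int × List Int × Int) (j : Int) =>
          if PySem.List.pyGetD (PySem.List.pyGetD dense_matrix j []) i 0 ≠ 0 then
            (s.1 ++ [PySem.List.pyGetD (PySem.List.pyGetD dense_matrix j []) i 0],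
             s.2.1 ++ [j], s.2.2 + 1)
          else s)
        (st.1, st.2.1, 0)
      (inner.1, inner.2.1,
       st.2.2 ++ [PySem.List.pyGetD st.2.2 (-1) 0 + inner.2.2]))
    ([], [], [0])

-- ===== PORT B =====
def compressed_col_sparse_matrix_alt (dense_matrix : List (List Int)) : List Int × List Int × List Int :=
  let cols : Nat := (PySem.List.pyGetD dense_matrix 0 []).length
  let buckets := (PySem.List.enumerate dense_matrix 0).foldl
    (fun (bs : List (List (Int × Int))) (p : Int × List Int) =>
      (List.range cols).foldl
        (fun (acc : List (List (Int × Int))) (i : Nat) =>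
          if PySem.List.pyGetD p.2 (i : Int) 0 ≠ 0 then
            acc.set i (acc.getD i [] ++ [(p.1, PySem.List.pyGetD p.2 (i : Int) 0)])
          else acc)
        bs)
    (List.replicate cols [])
  let vals := buckets.flatMap (fun b => b.map Prod.snd)
  let row_idx := buckets.flatMap (fun b => b.map Prod.fst)
  let col_ptr := buckets.foldl
    (fun cp b => cp ++ [PySem.List.pyGetD cp (-1) 0 + (b.length : Int)]) [0]
  (vals, row_idx, col_ptr)

-- ===== PRECONDITION & SPEC =====
-- Python A raises IndexError on the empty matrix (dense_matrix[0]) and whenever some row is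
-- shorter than the first row (dense_matrix[j][i] is reached for i up to len(row 0) - 1);
-- Pre_ admits exactly the inputs on which A returns normally.
def Pre_compressed_col_sparse_matrix (dense_matrix : List (List Int)) : Prop :=
  dense_matrix ≠ [] ∧ ∀ r ∈ dense_matrix, (dense_matrix.headD []).length ≤ r.length
instance (dense_matrix : List (List Int)) : Decidable (Pre_compressed_col_sparse_matrix dense_matrix) := by unfold Pre_compressed_col_sparse_matrix; infer_instance

def pvWitness_compressed_col_sparse_matrix : List (List Int) := [[0, 0, 3, 0], [1, 0, 0, 4], [0, 2, 0, 0]]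

def Spec_compressed_col_sparse_matrix (dense_matrix : List (List Int)) (out : List Int × List Int × List Int) : Prop := out = compressed_col_sparse_matrix_alt dense_matrix
instance (dense_matrix : List (List Int)) (out : List Int × List Int × List Int) : Decidable (Spec_compressed_col_sparse_matrix dense_matrix out) := by unfold Spec_compressed_col_sparse_matrix; infer_instance

-- ===== CLAIM (what is proved, stated in full; the proofs are below) =====
def Claim_equal_compressed_col_sparse_matrix : Prop := ∀ (dense_matrix : List (List Int)), Dom_compressed_col_sparse_matrix dense_matrix → Pre_compressed_col_sparse_matrix dense_matrix → Spec_compressed_col_sparse_matrix dense_matrix (compressed_col_sparse_matrix dense_matrix)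

-- ===== LEMMAS AND PROOFS =====

-- the entries of column i among rows t, whose first row has row index a: (row index, value) pairs
def colEntFrom (i : Int) : List (List Int) → Int → List (Int × Int)
  | [], _ => []
  | r :: rs, a =>
      (if PySem.List.pyGetD r i 0 ≠ 0 then [(a, PySem.List.pyGetD r i 0)] else [])
        ++ colEntFrom i rs (a + 1)

-- running cumulative sums starting from a base
def cps : Int → List Int → List Int
  | _, [] => []
  | b, n :: ns => (b + n) :: cps (b + n) ns

lemma innerA (mtx : List (List Int)) (i : Int) :
    ∀ (t : List (List Int)) (a : Int),
      (∀ d : Nat, d < t.length → PySem.List.pyGetD mtx (a + (d : Int)) [] = t.getD d []) →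
      ∀ (vals racc : List Int) (c : Int),
      (PySem.List.pyRange a (a + (t.length : Int)) 1).foldl
        (fun (s : List Int × List Int × Int) (j : Int) =>
          if PySem.List.pyGetD (PySem.List.pyGetD mtx j []) i 0 ≠ 0 then
            (s.1 ++ [PySem.List.pyGetD (PySem.List.pyGetD mtx j []) i 0],
             s.2.1 ++ [j], s.2.2 + 1)
          else s)
        (vals, racc, c)
      = (vals ++ (colEntFrom i t a).map Prod.snd,
         racc ++ (colEntFrom i t a).map Prod.fst,
         c + ((colEntFrom i t a).length : Int)) := by
  intro t
  induction t with
  | nil =>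
      intro a H vals racc c
      simp [colEntFrom, PySem.List.pyRange_one_eq_nil (le_refl a)]
  | cons r rs ih =>
      intro a H vals racc c
      have h1 : a < a + (((r :: rs).length : Nat) : Int) := by
        simp only [List.length_cons]; push_cast; omega
      rw [PySem.List.pyRange_one_cons h1]
      have hr : PySem.List.pyGetD mtx a [] = r := by
        have := H 0 (by simp)
        simpa using this
      have hend : a + (((r :: rs).length : Nat) : Int) = (a + 1) + ((rs.length : Nat) : Int) := by
        simp only [List.length_cons]; push_cast; ring
      have H' : ∀ d : Nat, d < rs.length →
          PySem.List.pyGetD mtx ((a + 1) + (d : Int)) [] = rs.getD d [] := by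
        intro d hd
        have h2 := H (d + 1) (by simpa using Nat.succ_lt_succ hd)
        have harith : a + ((d + 1 : Nat) : Int) = (a + 1) + (d : Int) := by push_cast; ring
        rw [harith] at h2
        simpa using h2
      rw [hend]
      simp only [List.foldl_cons]
      by_cases hv : PySem.List.pyGetD r i 0 ≠ 0
      · rw [show (if PySem.List.pyGetD (PySem.List.pyGetD mtx a []) i 0 ≠ 0 then
              ((vals, racc, c).1 ++ [PySem.List.pyGetD (PySem.List.pyGetD mtx a []) i 0],
               (vals, racc, c).2.1 ++ [a], (vals, racc, c).2.2 + 1)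
            else (vals, racc, c))
            = (vals ++ [PySem.List.pyGetD r i 0], racc ++ [a], c + 1) by simp [hr, hv]]
        rw [ih (a + 1) H']
        simp only [colEntFrom, if_pos hv, List.map_cons, List.length_cons,
          List.append_assoc, List.cons_append, List.nil_append, Prod.mk.injEq]
        refine ⟨trivial, trivial, ?_⟩
        push_cast; ring
      · rw [show (if PySem.List.pyGetD (PySem.List.pyGetD mtx a []) i 0 ≠ 0 then
              ((vals, racc, c).1 ++ [PySem.List.pyGetD (PySem.List.pyGetD mtx a []) i 0],
               (vals, racc, c).2.1 ++ [a], (vals, racc, c).2.2 + 1)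
            else (vals, racc, c))
            = (vals, racc, c) by simp [hr, hv]]
        rw [ih (a + 1) H']
        simp [colEntFrom, hv]

lemma cpFold {α : Type} (g : α → Int) :
    ∀ (xs : List α) (cp : List Int) (last : Int), cp.getLast? = some last →
      xs.foldl (fun cp x => cp ++ [PySem.List.pyGetD cp (-1) 0 + g x]) cp
      = cp ++ cps last (xs.map g) := by
  intro xs
  induction xs with
  | nil => intro cp last h; simp [cps]
  | cons x xs ih =>
      intro cp last h
      simp only [List.foldl_cons, List.map_cons, cps]
      rw [show PySem.List.pyGetD cp (-1) 0 = last by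
        simp [PySem.List.pyGetD, PySem.List.pyGet?_neg_one, h]]
      rw [ih (cp ++ [last + g x]) (last + g x) List.getLast?_concat]
      simp

lemma outerA (f : Int → List (Int × Int)) :
    ∀ (is : List Int) (vals racc cp : List Int) (last : Int), cp.getLast? = some last →
      is.foldl
        (fun (st : List Int × List Int × List Int) (i : Int) =>
          (st.1 ++ (f i).map Prod.snd, st.2.1 ++ (f i).map Prod.fst,
           st.2.2 ++ [PySem.List.pyGetD st.2.2 (-1) 0 + ((f i).length : Int)]))
        (vals, racc, cp)
      = (vals ++ is.flatMap (fun i => (f i).map Prod.snd),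
         racc ++ is.flatMap (fun i => (f i).map Prod.fst),
         cp ++ cps last (is.map (fun i => ((f i).length : Int)))) := by
  intro is
  induction is with
  | nil => intro vals racc cp last h; simp [cps]
  | cons i is ih =>
      intro vals racc cp last h
      simp only [List.foldl_cons, List.map_cons, List.flatMap_cons, cps]
      rw [show PySem.List.pyGetD cp (-1) 0 = last by
        simp [PySem.List.pyGetD, PySem.List.pyGet?_neg_one, h]]
      rw [ih (vals ++ (f i).map Prod.snd) (racc ++ (f i).map Prod.fst)
          (cp ++ [last + ((f i).length : Int)]) (last + ((f i).length : Int))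
          List.getLast?_concat]
      simp

-- B-side: the effect of one row (row index jv) on the buckets, first bucket having column index k
def updRow (jv : Int) (row : List Int) : List (List (Int × Int)) → Nat → List (List (Int × Int))
  | [], _ => []
  | b :: bs, k =>
      (b ++ if PySem.List.pyGetD row (k : Int) 0 ≠ 0
            then [(jv, PySem.List.pyGetD row (k : Int) 0)] else [])
        :: updRow jv row bs (k + 1)

-- B-side: the effect of all rows t (first row index a) on the buckets (first column index k)
def addCols (t : List (List Int)) (a : Int) : List (List (Int × Int)) → Nat → List (List (Int × Int))
  | [], _ => []
  | b :: bs, k => (b ++ colEntFrom (k : Int) t a) :: addCols t a bs (k + 1)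

lemma set_append_cons {α : Type} (pre : List α) (b x : α) (bs : List α) :
    (pre ++ b :: bs).set pre.length x = pre ++ x :: bs := by
  induction pre with
  | nil => simp
  | cons p pre ih => simp [ih]

lemma getD_append_cons {α : Type} (pre : List α) (b : α) (bs : List α) (d : α) :
    (pre ++ b :: bs).getD pre.length d = b := by
  induction pre with
  | nil => simp
  | cons p pre ih => simp [ih]

lemma length_updRow (jv : Int) (row : List Int) :
    ∀ (bs : List (List (Int × Int))) (k : Nat), (updRow jv row bs k).length = bs.length := by
  intro bs
  induction bs with
  | nil => intro k; simp [updRow]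
  | cons b bs ih => intro k; simp [updRow, ih]

lemma innerB (jv : Int) (row : List Int) :
    ∀ (bs pre : List (List (Int × Int))),
      (List.range' pre.length bs.length).foldl
        (fun (acc : List (List (Int × Int))) (i : Nat) =>
          if PySem.List.pyGetD row (i : Int) 0 ≠ 0 then
            acc.set i (acc.getD i [] ++ [(jv, PySem.List.pyGetD row (i : Int) 0)])
          else acc)
        (pre ++ bs)
      = pre ++ updRow jv row bs pre.length := by
  intro bs
  induction bs with
  | nil => intro pre; simp [updRow]
  | cons b bs ih =>
      intro pre
      simp only [List.length_cons, List.range'_succ, List.foldl_cons]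
      have hstep :
          (if PySem.List.pyGetD row (pre.length : Int) 0 ≠ 0 then
            (pre ++ b :: bs).set pre.length
              ((pre ++ b :: bs).getD pre.length [] ++ [(jv, PySem.List.pyGetD row (pre.length : Int) 0)])
          else pre ++ b :: bs)
          = (pre ++ [b ++ if PySem.List.pyGetD row (pre.length : Int) 0 ≠ 0
              then [(jv, PySem.List.pyGetD row (pre.length : Int) 0)] else []]) ++ bs := by
        by_cases hv : PySem.List.pyGetD row (pre.length : Int) 0 ≠ 0
        · simp only [if_pos hv, getD_append_cons, set_append_cons]
          simp
        · simp only [if_neg hv]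
          simp
      rw [hstep]
      have h2 := ih (pre ++ [b ++ if PySem.List.pyGetD row (pre.length : Int) 0 ≠ 0
              then [(jv, PySem.List.pyGetD row (pre.length : Int) 0)] else []])
      simp only [List.length_append, List.length_cons, List.length_nil] at h2
      rw [h2]
      simp [updRow]

lemma addCols_nil (a : Int) :
    ∀ (bs : List (List (Int × Int))) (k : Nat), addCols [] a bs k = bs := by
  intro bs
  induction bs with
  | nil => intro k; simp [addCols]
  | cons b bs ih => intro k; simp [addCols, colEntFrom, ih]

lemma addCols_updRow (r : List Int) (rs : List (List Int)) (a : Int) :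
    ∀ (bs : List (List (Int × Int))) (k : Nat),
      addCols rs (a + 1) (updRow a r bs k) k = addCols (r :: rs) a bs k := by
  intro bs
  induction bs with
  | nil => intro k; simp [updRow, addCols]
  | cons b bs ih =>
      intro k
      simp [updRow, addCols, colEntFrom, ih, List.append_assoc]

lemma outerB (cols : Nat) :
    ∀ (t : List (List Int)) (a : Int) (bs : List (List (Int × Int))), bs.length = cols →
      (PySem.List.enumerate t a).foldl
        (fun (bs : List (List (Int × Int))) (p : Int × List Int) =>
          (List.range cols).foldl
            (fun (acc : List (List (Int × Int))) (i : Nat) =>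
              if PySem.List.pyGetD p.2 (i : Int) 0 ≠ 0 then
                acc.set i (acc.getD i [] ++ [(p.1, PySem.List.pyGetD p.2 (i : Int) 0)])
              else acc)
            bs)
        bs
      = addCols t a bs 0 := by
  intro t
  induction t with
  | nil => intro a bs h; simp [PySem.List.enumerate, addCols_nil]
  | cons r rs ih =>
      intro a bs h
      rw [PySem.List.enumerate_cons]
      simp only [List.foldl_cons]
      have hin : (List.range cols).foldl
            (fun (acc : List (List (Int × Int))) (i : Nat) =>
              if PySem.List.pyGetD r (i : Int) 0 ≠ 0 then
                acc.set i (acc.getD i [] ++ [(a, PySem.List.pyGetD r (i : Int) 0)])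
              else acc)
            bs = updRow a r bs 0 := by
        have h3 := innerB a r bs []
        simpa [List.range_eq_range', h] using h3
      rw [hin, ih (a + 1) (updRow a r bs 0) (by rw [length_updRow]; exact h)]
      exact addCols_updRow r rs a bs 0

lemma addCols_replicate (t : List (List Int)) (a : Int) :
    ∀ (n k : Nat),
      addCols t a (List.replicate n []) k
      = (List.range' k n).map (fun (d : Nat) => colEntFrom (d : Int) t a) := by
  intro n
  induction n with
  | zero => intro k; simp [addCols]
  | succ n ih =>
      intro n_1
      simp only [List.replicate_succ, addCols, List.range'_succ]
      rw [ih (n_1 + 1)]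
      simp

lemma A_closed (mtx : List (List Int)) :
    compressed_col_sparse_matrix mtx
    = ((PySem.List.pyRange 0 ((PySem.List.pyGetD mtx 0 []).length : Int) 1).flatMap
         (fun i => (colEntFrom i mtx 0).map Prod.snd),
       (PySem.List.pyRange 0 ((PySem.List.pyGetD mtx 0 []).length : Int) 1).flatMap
         (fun i => (colEntFrom i mtx 0).map Prod.fst),
       [0] ++ cps 0 ((PySem.List.pyRange 0 ((PySem.List.pyGetD mtx 0 []).length : Int) 1).map
         (fun i => ((colEntFrom i mtx 0).length : Int)))) := by
  unfold compressed_col_sparse_matrix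
  have hbody : (fun (st : List Int × List Int × List Int) (i : Int) =>
      let inner := (PySem.List.pyRange 0 (mtx.length : Int) 1).foldl
        (fun (s : List Int × List Int × Int) (j : Int) =>
          if PySem.List.pyGetD (PySem.List.pyGetD mtx j []) i 0 ≠ 0 then
            (s.1 ++ [PySem.List.pyGetD (PySem.List.pyGetD mtx j []) i 0],
             s.2.1 ++ [j], s.2.2 + 1)
          else s)
        (st.1, st.2.1, 0)
      (inner.1, inner.2.1,
       st.2.2 ++ [PySem.List.pyGetD st.2.2 (-1) 0 + inner.2.2]))
      = (fun (st : List Int × List Int × List Int) (i : Int) =>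
          (st.1 ++ (colEntFrom i mtx 0).map Prod.snd,
           st.2.1 ++ (colEntFrom i mtx 0).map Prod.fst,
           st.2.2 ++ [PySem.List.pyGetD st.2.2 (-1) 0 + ((colEntFrom i mtx 0).length : Int)])) := by
    funext st i
    have H : ∀ d : Nat, d < mtx.length →
        PySem.List.pyGetD mtx ((0 : Int) + (d : Int)) [] = mtx.getD d [] := by
      intro d _
      rw [zero_add, PySem.List.pyGetD_natCast]
    have hi := innerA mtx i mtx 0 H st.1 st.2.1 0
    simp only [zero_add] at hi
    dsimp only
    rw [hi]
  dsimp only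
  rw [hbody]
  have h1 := outerA (fun i => colEntFrom i mtx 0)
      (PySem.List.pyRange 0 ((PySem.List.pyGetD mtx 0 []).length : Int) 1)
      [] [] [0] 0 (by simp)
  dsimp only at h1
  rw [h1]
  simp only [List.nil_append]

lemma bridge_flatMap {β γ : Type} (F : Int → β) (g : β → List γ) :
    ∀ n : Nat, ((List.range n).map (fun (k : Nat) => F (k : Int))).flatMap g
      = (PySem.List.pyRange 0 (n : Int) 1).flatMap (fun i => g (F i)) := by
  intro n
  induction n with
  | zero => simp [PySem.List.pyRange_one_eq_nil (le_refl (0 : Int))]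
  | succ n ih =>
      rw [List.range_succ, show ((n + 1 : Nat) : Int) = (n : Int) + 1 by push_cast; ring,
          PySem.List.pyRange_one_succ_right (Int.natCast_nonneg n)]
      simp only [List.map_append, List.flatMap_append, ih, List.map_cons, List.map_nil,
        List.flatMap_cons, List.flatMap_nil, List.append_nil]

lemma bridge_map {β γ : Type} (F : Int → β) (g : β → γ) :
    ∀ n : Nat, ((List.range n).map (fun (k : Nat) => F (k : Int))).map g
      = (PySem.List.pyRange 0 (n : Int) 1).map (fun i => g (F i)) := by
  intro n
  induction n with
  | zero => simp [PySem.List.pyRange_one_eq_nil (le_refl (0 : Int))]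
  | succ n ih =>
      rw [List.range_succ, show ((n + 1 : Nat) : Int) = (n : Int) + 1 by push_cast; ring,
          PySem.List.pyRange_one_succ_right (Int.natCast_nonneg n)]
      simp only [List.map_append, ih, List.map_cons, List.map_nil]

lemma B_closed (mtx : List (List Int)) :
    compressed_col_sparse_matrix_alt mtx
    = ((PySem.List.pyRange 0 ((PySem.List.pyGetD mtx 0 []).length : Int) 1).flatMap
         (fun i => (colEntFrom i mtx 0).map Prod.snd),
       (PySem.List.pyRange 0 ((PySem.List.pyGetD mtx 0 []).length : Int) 1).flatMap
         (fun i => (colEntFrom i mtx 0).map Prod.fst),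
       [0] ++ cps 0 ((PySem.List.pyRange 0 ((PySem.List.pyGetD mtx 0 []).length : Int) 1).map
         (fun i => ((colEntFrom i mtx 0).length : Int)))) := by
  unfold compressed_col_sparse_matrix_alt
  dsimp only
  have hb := outerB (PySem.List.pyGetD mtx 0 []).length mtx 0
      (List.replicate (PySem.List.pyGetD mtx 0 []).length []) (by simp)
  rw [addCols_replicate mtx 0 (PySem.List.pyGetD mtx 0 []).length 0,
      ← List.range_eq_range'] at hb
  rw [hb]
  have h2 := cpFold (fun (b : List (Int × Int)) => (b.length : Int))
      ((List.range (PySem.List.pyGetD mtx 0 []).length).map (fun (k : Nat) => colEntFrom (k : Int) mtx 0))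
      [0] 0 (by simp)
  dsimp only at h2
  rw [h2]
  rw [bridge_flatMap (fun i => colEntFrom i mtx 0) (fun b => b.map Prod.snd)
        (PySem.List.pyGetD mtx 0 []).length,
      bridge_flatMap (fun i => colEntFrom i mtx 0) (fun b => b.map Prod.fst)
        (PySem.List.pyGetD mtx 0 []).length,
      bridge_map (fun i => colEntFrom i mtx 0) (fun b => (b.length : Int))
        (PySem.List.pyGetD mtx 0 []).length]

-- ===== VERDICT (by name: the statement is the Claim_ definition above) =====
theorem compressed_col_sparse_matrix_spec : Claim_equal_compressed_col_sparse_matrix := by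
  intro dense_matrix _ _
  unfold Spec_compressed_col_sparse_matrix
  rw [A_closed, B_closed]
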